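-- pv_equiv track=rewrite | github.com/plugalilweird/kr | exam/2d_array.py | min2DArray
-- ===== SOURCE A (Python) =====
-- def min2DArray(nums: list):
--     frequency = {}
--     for number in nums:
--         if number in frequency:
--             frequency[number] += 1
--         else:
--             frequency[number] = 1
--
--     max_frequency = 0
--     for count in frequency.values():
--         if count > max_frequency:
--             max_frequency = count
--
--     result_rows = [[] for _ in range(max_frequency)]
--
--     next_row_index = {}
--     for number in frequency:
--         next_row_index[number] = 0
--
--     for number in nums:
--         row_index = next_row_index[number]
--         result_rows[row_index].append(number)
--         next_row_index[number] += 1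
--
--     return result_rows
-- ===== SOURCE B (Python) =====
-- def min2DArray(nums: list):
--     # Single pass: grow the result lazily; counts[n] is n's next row index.
--     result = []
--     counts = {}
--     for number in nums:
--         idx = counts.get(number, 0)
--         if len(result) == idx:
--             result.append([])
--         result[idx].append(number)
--         counts[number] = idx + 1
--     return result
-- ===== Notes on version B (the rewrite author's own statement) =====
-- stated objective: simpler
-- what changed: Replaced A's four passes (count frequencies, scan for max, pre-allocate rows, init per-key indices) by one pass that grows the result lazily with a single running next-row-index dict.
import Mathlib
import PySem

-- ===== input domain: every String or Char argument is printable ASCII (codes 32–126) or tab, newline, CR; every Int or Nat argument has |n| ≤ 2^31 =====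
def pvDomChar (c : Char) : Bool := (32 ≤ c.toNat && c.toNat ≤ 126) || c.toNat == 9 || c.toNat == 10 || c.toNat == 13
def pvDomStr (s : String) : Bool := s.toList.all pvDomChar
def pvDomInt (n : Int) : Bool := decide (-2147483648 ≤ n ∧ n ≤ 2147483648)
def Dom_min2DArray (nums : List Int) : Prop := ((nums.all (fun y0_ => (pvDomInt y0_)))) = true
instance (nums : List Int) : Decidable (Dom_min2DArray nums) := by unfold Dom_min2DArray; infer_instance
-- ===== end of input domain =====

-- B replaces A's four passes (frequency count, max scan, row pre-allocation, index-dict init)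
-- by one pass growing the result lazily; objective: simpler. Same return value on all inputs.


-- ===== PORT A =====
-- the main placement loop of A: result_rows[row_index].append(number); next_row_index[number] += 1
-- (row_index is a dict value that starts at 0 and is only incremented, so it is never negative
-- and always within range in Python; .toNat / getD are exact on every reachable state)
def pvStepA (st : List (List Int) × PySem.Dict Int Int) (number : Int) :
    List (List Int) × PySem.Dict Int Int :=
  let rowIndex := st.2.getD number 0   -- next_row_index[number]; the key is always present
  (st.1.set rowIndex.toNat (st.1.getD rowIndex.toNat [] ++ [number]),
   st.2.insert number (rowIndex + 1))

def min2DArray (nums : List Int) : List (List Int) :=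
  let frequency := nums.foldl
    (fun d number => if d.contains number then d.insert number (d.getD number 0 + 1)
                     else d.insert number 1) PySem.Dict.empty
  let maxFrequency := frequency.values.foldl (fun m c => if c > m then c else m) (0 : Int)
  let resultRows := List.replicate maxFrequency.toNat ([] : List Int)
  let nextRowIndex := frequency.keys.foldl (fun d number => d.insert number (0 : Int))
    PySem.Dict.empty
  (nums.foldl pvStepA (resultRows, nextRowIndex)).1

-- ===== PORT B =====
-- B's single-pass body: idx = counts.get(number, 0); grow result if needed; append; bump counts
def pvStepB (st : List (List Int) × PySem.Dict Int Int) (number : Int) :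
    List (List Int) × PySem.Dict Int Int :=
  let idx := st.2.getD number 0        -- counts.get(number, 0)
  let result := if (st.1.length : Int) = idx then st.1 ++ [[]] else st.1
  (result.set idx.toNat (result.getD idx.toNat [] ++ [number]),
   st.2.insert number (idx + 1))

def min2DArray_alt (nums : List Int) : List (List Int) :=
  (nums.foldl pvStepB ([], PySem.Dict.empty)).1

-- ===== PRECONDITION & SPEC =====
def Spec_min2DArray (nums : List Int) (out : List (List Int)) : Prop := out = min2DArray_alt nums
instance (nums : List Int) (out : List (List Int)) : Decidable (Spec_min2DArray nums out) := by unfold Spec_min2DArray; infer_instance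

-- ===== CLAIM (what is proved, stated in full; the proofs are below) =====
def Claim_equal_min2DArray : Prop := ∀ (nums : List Int), Dom_min2DArray nums → Spec_min2DArray nums (min2DArray nums)

-- ===== LEMMAS AND PROOFS =====

lemma pvFreq_eq_counter (nums : List Int) :
    nums.foldl (fun d number => if d.contains number then d.insert number (d.getD number 0 + 1)
                     else d.insert number 1) PySem.Dict.empty = PySem.Dict.counter nums := by
  rw [← PySem.Dict.foldl_insert_getD_add_one_eq_counter]
  congr 1
  funext d x
  by_cases h : d.contains x
  · simp [h]
  · simp only [Bool.not_eq_true] at h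
    simp [h, PySem.Dict.getD_of_not_contains d 0 h]

lemma pvMax_eq_foldl_max (vs : List Int) :
    vs.foldl (fun m c => if c > m then c else m) (0 : Int) = vs.foldl max 0 := by
  congr 1
  funext m c
  rcases le_or_gt c m with h | h
  · simp [not_lt.2 h, max_eq_left h]
  · simp [h, max_eq_right h.le]

lemma pvFoldlMax_le (vs : List Int) (a b : Int) (hb : a ≤ b) (h : ∀ v ∈ vs, v ≤ b) :
    vs.foldl max a ≤ b := by
  induction vs generalizing a with
  | nil => exact hb
  | cons v vs ih =>
    exact ih (max a v) (max_le hb (h v (by simp))) (fun w hw => h w (by simp [hw]))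

lemma pvInit_getD (ks : List Int) (d : PySem.Dict Int Int) (h : ∀ n, d.getD n 0 = 0) (n : Int) :
    (ks.foldl (fun d number => d.insert number (0 : Int)) d).getD n 0 = 0 := by
  induction ks generalizing d with
  | nil => exact h n
  | cons k ks ih =>
    exact ih _ (fun m => by rw [PySem.Dict.getD_insert]; split <;> simp [h])

lemma pvMain (r : List Int) (p : List Int) (rowsB : List (List Int))
    (dA dB : PySem.Dict Int Int) (M : Nat)
    (hA : ∀ n, dA.getD n 0 = (p.count n : Int))
    (hB : ∀ n, dB.getD n 0 = (p.count n : Int))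
    (hlen : ∀ n, p.count n ≤ rowsB.length)
    (hM : ∀ n ∈ r, (p ++ r).count n ≤ M)
    (hBM : rowsB.length ≤ M) :
    (r.foldl pvStepA (rowsB ++ List.replicate (M - rowsB.length) [], dA)).1
      = (r.foldl pvStepB (rowsB, dB)).1
        ++ List.replicate (M - (r.foldl pvStepB (rowsB, dB)).1.length) []
    ∧ (r.foldl pvStepB (rowsB, dB)).1.length ≤ M
    ∧ ∀ n, (p ++ r).count n ≤ (r.foldl pvStepB (rowsB, dB)).1.length := by
  induction r generalizing p rowsB dA dB with
  | nil =>
    refine ⟨rfl, hBM, ?_⟩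
    simpa using hlen
  | cons n r ih =>
    have hc : p.count n ≤ rowsB.length := hlen n
    have hcM : p.count n < M := by
      have := hM n (by simp)
      simp [List.count_append, List.count_cons_self] at this
      omega
    simp only [List.foldl_cons]
    have hAeq : pvStepA (rowsB ++ List.replicate (M - rowsB.length) [], dA) n
        = ((rowsB ++ List.replicate (M - rowsB.length) []).set (p.count n)
            ((rowsB ++ List.replicate (M - rowsB.length) []).getD (p.count n) [] ++ [n]),
           dA.insert n ((p.count n : Int) + 1)) := by
      simp [pvStepA, hA n]
    rw [hAeq]
    have hdA' : ∀ m, (dA.insert n ((p.count n : Int) + 1)).getD m 0 = ((p ++ [n]).count m : Int) := by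
      intro m
      rw [PySem.Dict.getD_insert]
      by_cases hmn : m = n
      · subst hmn; simp [List.count_append]
      · simp [hmn, hA m, List.count_append, List.count_singleton, Ne.symm hmn]
    rcases Nat.lt_or_ge (p.count n) rowsB.length with hlt | hge
    · -- idx strictly below current B length: no growth
      have hBeq : pvStepB (rowsB, dB) n
          = (rowsB.set (p.count n) (rowsB.getD (p.count n) [] ++ [n]),
             dB.insert n ((p.count n : Int) + 1)) := by
        have hne : ((rowsB.length : Int) = (p.count n : Int)) = False := by
          simp; omega
        simp [pvStepB, hB n, hne]
      rw [hBeq]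
      have hget : (rowsB ++ List.replicate (M - rowsB.length) ([] : List Int)).getD (p.count n) []
          = rowsB.getD (p.count n) [] := List.getD_append _ _ _ _ hlt
      have hset : (rowsB ++ List.replicate (M - rowsB.length) ([] : List Int)).set (p.count n)
            (rowsB.getD (p.count n) [] ++ [n])
          = rowsB.set (p.count n) (rowsB.getD (p.count n) [] ++ [n])
              ++ List.replicate (M - (rowsB.set (p.count n) (rowsB.getD (p.count n) [] ++ [n])).length) [] := by
        rw [List.set_append, if_pos hlt, List.length_set]
      rw [hget, hset]
      have hdB' : ∀ m, (dB.insert n ((p.count n : Int) + 1)).getD m 0 = ((p ++ [n]).count m : Int) := by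
        intro m
        rw [PySem.Dict.getD_insert]
        by_cases hmn : m = n
        · subst hmn; simp [List.count_append]
        · simp [hmn, hB m, List.count_append, Ne.symm hmn]
      have hsplit : p ++ n :: r = (p ++ [n]) ++ r := by simp
      rw [hsplit]
      exact ih (p ++ [n]) (rowsB.set (p.count n) (rowsB.getD (p.count n) [] ++ [n]))
        (dA.insert n ((p.count n : Int) + 1)) (dB.insert n ((p.count n : Int) + 1)) hdA' hdB'
        (fun m => by
          by_cases hmn : m = n
          · subst hmn; simp [List.count_append]; omega
          · simp [List.count_append, Ne.symm hmn]
            exact hlen m)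
        (fun m hm => by
          have := hM m (by simp [hm])
          simpa [List.count_append, List.count_cons] using this)
        (by simpa using hBM)
    · -- idx equals current B length: B grows by one row, A writes into the padding
      have heq : p.count n = rowsB.length := le_antisymm hc hge
      have hBeq : pvStepB (rowsB, dB) n
          = (rowsB ++ [[n]], dB.insert n ((p.count n : Int) + 1)) := by
        have hcond : ((rowsB.length : Int) = (p.count n : Int)) := by exact_mod_cast heq.symm
        have hgrow : (rowsB ++ [[]]).getD (p.count n) ([] : List Int) = [] := by
          rw [heq]
          simp [List.getD, List.getElem?_append_right]
        have hsetg : (rowsB ++ [([] : List Int)]).set (p.count n) ([] ++ [n]) = rowsB ++ [[n]] := by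
          rw [heq, List.set_append, if_neg (by omega)]
          simp
        simp only [pvStepB, hB n, if_pos hcond, Int.toNat_natCast, hgrow, hsetg]
      rw [hBeq]
      have hpad : M - rowsB.length = (M - rowsB.length - 1) + 1 := by omega
      have hgetA : (rowsB ++ List.replicate (M - rowsB.length) ([] : List Int)).getD (p.count n) [] = [] := by
        rw [heq, hpad, List.replicate_succ]
        simp [List.getD, List.getElem?_append_right]
      have hsetA : (rowsB ++ List.replicate (M - rowsB.length) ([] : List Int)).set (p.count n) ([] ++ [n])
          = (rowsB ++ [[n]]) ++ List.replicate (M - (rowsB ++ [[n]]).length) [] := by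
        rw [heq, hpad, List.replicate_succ, List.set_append, if_neg (by omega)]
        simp
        omega
      rw [hgetA, hsetA]
      have hdB' : ∀ m, (dB.insert n ((p.count n : Int) + 1)).getD m 0 = ((p ++ [n]).count m : Int) := by
        intro m
        rw [PySem.Dict.getD_insert]
        by_cases hmn : m = n
        · subst hmn; simp [List.count_append]
        · simp [hmn, hB m, List.count_append, Ne.symm hmn]
      have hsplit : p ++ n :: r = (p ++ [n]) ++ r := by simp
      rw [hsplit]
      exact ih (p ++ [n]) (rowsB ++ [[n]])
        (dA.insert n ((p.count n : Int) + 1)) (dB.insert n ((p.count n : Int) + 1)) hdA' hdB'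
        (fun m => by
          by_cases hmn : m = n
          · subst hmn; simp [List.count_append, heq]
          · simp [List.count_append, Ne.symm hmn]
            have := hlen m; omega)
        (fun m hm => by
          have := hM m (by simp [hm])
          simpa [List.count_append, List.count_cons] using this)
        (by simp; omega)

theorem pvEqAll : ∀ (nums : List Int), min2DArray nums = min2DArray_alt nums := by
  intro nums
  simp only [min2DArray, min2DArray_alt, pvFreq_eq_counter, pvMax_eq_foldl_max]
  set vals := (PySem.Dict.counter nums).values with hvals
  set M0 : Int := vals.foldl max 0 with hM0
  have hvals_eq : vals = (PySem.Set.ofList nums).map (fun k => ((nums.count k : Int))) := by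
    rw [hvals]
    show (PySem.Dict.counter nums).items.map (·.2) = _
    rw [PySem.Dict.items_counter]
    simp [List.map_map, Function.comp]
  have hM0nonneg : 0 ≤ M0 := (PySem.List.le_foldl_max vals 0).1
  have hub : ∀ n ∈ nums, (nums.count n : Int) ≤ M0 := by
    intro n hn
    exact (PySem.List.le_foldl_max vals 0).2 _
      (by rw [hvals_eq]; exact List.mem_map_of_mem ((PySem.Set.mem_ofList nums n).2 hn))
  have hinit : ∀ n, ((PySem.Dict.counter nums).keys.foldl
      (fun d number => d.insert number (0 : Int)) PySem.Dict.empty).getD n 0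
      = ((List.count n ([] : List Int) : Nat) : Int) := by
    intro n
    simp [pvInit_getD _ PySem.Dict.empty (fun m => by simp [PySem.Dict.getD_empty])]
  have hmain := pvMain nums [] [] _ PySem.Dict.empty M0.toNat hinit
    (fun n => by simp [PySem.Dict.getD_empty])
    (fun n => by simp)
    (fun n hn => by
      have := hub n hn
      simp only [List.nil_append]
      omega)
    (by simp)
  obtain ⟨h1, h2, h3⟩ := hmain
  simp only [List.nil_append, List.length_nil, Nat.sub_zero] at h1 h2 h3
  rw [h1]
  have hMle : M0.toNat ≤ (List.foldl pvStepB ([], PySem.Dict.empty) nums).1.length := by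
    have : M0 ≤ ((List.foldl pvStepB ([], PySem.Dict.empty) nums).1.length : Int) := by
      apply pvFoldlMax_le vals 0 _ (by positivity)
      intro v hv
      rw [hvals_eq] at hv
      obtain ⟨k, hk, rfl⟩ := List.mem_map.1 hv
      exact_mod_cast h3 k
    omega
  rw [Nat.sub_eq_zero_of_le hMle]
  simp

-- ===== VERDICT (by name: the statement is the Claim_ definition above) =====
theorem min2DArray_spec : Claim_equal_min2DArray := by
  intro nums _
  exact pvEqAll nums
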